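-- pv_equiv track=rewrite | github.com/dkioroglou/fresnote | fresnote/classes/renderer/__init__.py | render_icon_markups
-- ===== SOURCE A (Python) =====
-- def render_icon_markups(text: str) -> str:
--     icons = {
--             'todo' : '<img id="todoIcon" src="/static/icons/todo-circle-regular.svg" alt="drawing" width="20"/>',
--             'done' : '<img id="todoIcon" src="/static/icons/check-circle-regular.svg" alt="drawing" width="20"/>',
--             'error': '<img id="todoIcon" src="/static/icons/bug-solid.svg" alt="drawing" width="20"/>'
--             }
--     for icon in icons.keys():
--         if f"\{icon}" in text:
--             text = text.replace(f"\{icon}", icons[icon])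
--     return text
-- ===== SOURCE B (Python) =====
-- def render_icon_markups(text: str) -> str:
--     icons = {
--             'todo' : '<img id="todoIcon" src="/static/icons/todo-circle-regular.svg" alt="drawing" width="20"/>',
--             'done' : '<img id="todoIcon" src="/static/icons/check-circle-regular.svg" alt="drawing" width="20"/>',
--             'error': '<img id="todoIcon" src="/static/icons/bug-solid.svg" alt="drawing" width="20"/>'
--             }
--     out = []
--     i = 0
--     n = len(text)
--     while i < n:
--         if text[i] == '\\':
--             for name, html in icons.items():
--                 if text.startswith(name, i + 1):
--                     out.append(html)
--                     i += 1 + len(name)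
--                     break
--             else:
--                 out.append(text[i])
--                 i += 1
--         else:
--             out.append(text[i])
--             i += 1
--     return ''.join(out)
-- ===== Notes on version B (the rewrite author's own statement) =====
-- stated objective: alternative
-- what changed: Replaces the three sequential full-string contains-then-replace passes with a single left-to-right scan that resolves each backslash marker once and joins the pieces.
import Mathlib
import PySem

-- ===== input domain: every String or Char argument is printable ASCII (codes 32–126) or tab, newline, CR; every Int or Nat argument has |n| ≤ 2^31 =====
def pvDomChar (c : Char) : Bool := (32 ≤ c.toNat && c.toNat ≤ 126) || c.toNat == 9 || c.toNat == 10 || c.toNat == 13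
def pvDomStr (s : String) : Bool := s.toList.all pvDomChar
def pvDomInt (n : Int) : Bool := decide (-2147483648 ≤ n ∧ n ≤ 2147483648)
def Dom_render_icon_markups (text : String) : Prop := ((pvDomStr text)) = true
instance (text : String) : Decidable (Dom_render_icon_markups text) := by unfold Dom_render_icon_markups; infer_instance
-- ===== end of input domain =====

-- B replaces A's three sequential contains-then-replace passes with a single left-to-right
-- scan resolving each backslash marker once (objective: alternative; same observable result).

-- ===== PORT A =====
def iconTodoHtml : String := "<img id=\"todoIcon\" src=\"/static/icons/todo-circle-regular.svg\" alt=\"drawing\" width=\"20\"/>"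
def iconDoneHtml : String := "<img id=\"todoIcon\" src=\"/static/icons/check-circle-regular.svg\" alt=\"drawing\" width=\"20\"/>"
def iconErrorHtml : String := "<img id=\"todoIcon\" src=\"/static/icons/bug-solid.svg\" alt=\"drawing\" width=\"20\"/>"

-- literal port of A: for icon in ['todo','done','error']: if f"\{icon}" in text: text = text.replace(...)
def render_icon_markups (text : String) : String :=
  let text := if PySem.Str.isIn "\\todo" text then PySem.Str.replace text "\\todo" iconTodoHtml else text
  let text := if PySem.Str.isIn "\\done" text then PySem.Str.replace text "\\done" iconDoneHtml else text
  let text := if PySem.Str.isIn "\\error" text then PySem.Str.replace text "\\error" iconErrorHtml else text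
  text

-- ===== PORT B =====
-- port of Source B's while-loop: one pass over the characters; on '\' try the marker names in order
def scanIcons : List Char → List Char
  | [] => []
  | c :: t =>
    if c = '\\' then
      if "todo".toList.isPrefixOf t then iconTodoHtml.toList ++ scanIcons (t.drop 4)
      else if "done".toList.isPrefixOf t then iconDoneHtml.toList ++ scanIcons (t.drop 4)
      else if "error".toList.isPrefixOf t then iconErrorHtml.toList ++ scanIcons (t.drop 5)
      else c :: scanIcons t
    else c :: scanIcons t
termination_by s => s.length
decreasing_by all_goals (simp; try omega)

def render_icon_markups_alt (text : String) : String := String.ofList (scanIcons text.toList)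

-- ===== PRECONDITION & SPEC =====
def Spec_render_icon_markups (text : String) (out : String) : Prop := out = render_icon_markups_alt text
instance (text : String) (out : String) : Decidable (Spec_render_icon_markups text out) := by unfold Spec_render_icon_markups; infer_instance

-- ===== CLAIM (what is proved, stated in full; the proofs are below) =====
def Claim_equal_render_icon_markups : Prop := ∀ (text : String), Dom_render_icon_markups text → Spec_render_icon_markups text (render_icon_markups text)

-- ===== LEMMAS AND PROOFS =====

-- generic one-pattern scanner: what a single s.replace(pat, rep) pass computes, written as a scan
def scan1 (pat rep : List Char) : List Char → List Char
  | [] => []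
  | c :: t =>
    if pat.isPrefixOf (c :: t) then rep ++ scan1 pat rep (t.drop (pat.length - 1))
    else c :: scan1 pat rep t
termination_by s => s.length
decreasing_by all_goals (simp; try omega)

lemma replace_go_eq_scan1 (pat rep : List Char) (hpat : pat ≠ []) :
    ∀ (fuel : Nat) (l acc : List Char), l.length ≤ fuel →
      PySem.Chars.replace.go pat rep fuel l acc = acc.reverse ++ scan1 pat rep l := by
  intro fuel
  induction fuel with
  | zero =>
    intro l acc hl
    have : l = [] := by cases l <;> simp_all
    subst this
    simp [PySem.Chars.replace.go, scan1]
  | succ n ih =>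
    intro l acc hl
    cases l with
    | nil => simp [PySem.Chars.replace.go, scan1]
    | cons c t =>
      by_cases h : pat.isPrefixOf (c :: t)
      · have hdrop : List.drop pat.length (c :: t) = t.drop (pat.length - 1) := by
          cases pat with
          | nil => exact absurd rfl hpat
          | cons p ps => simp
        rw [PySem.Chars.replace.go, if_pos h, hdrop, ih _ _ (by simp at hl ⊢; omega)]
        rw [scan1, if_pos h]
        simp
      · rw [PySem.Chars.replace.go, if_neg h, ih _ _ (by simp at hl ⊢; omega)]
        rw [scan1, if_neg h]
        simp

lemma replace_eq_scan1 (s pat rep : List Char) (hpat : pat ≠ []) :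
    PySem.Chars.replace s pat rep = scan1 pat rep s := by
  rw [PySem.Chars.replace, if_neg (by simp [List.isEmpty_iff, hpat])]
  simpa using replace_go_eq_scan1 pat rep hpat s.length s [] le_rfl

lemma scan1_of_not_infix (pat rep : List Char) :
    ∀ s : List Char, ¬ pat <:+: s → scan1 pat rep s = s := by
  intro s
  induction s using scan1.induct pat with
  | case1 => intro _; simp [scan1]
  | case2 c t h ih =>
    intro hinf
    exact absurd (List.IsPrefix.isInfix (List.isPrefixOf_iff_prefix.mp h)) hinf
  | case3 c t h ih =>
    intro hinf
    rw [scan1, if_neg h]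
    rw [ih (fun hi => hinf (hi.trans (List.suffix_cons c t).isInfix))]

lemma scan1_cons_ne (pq rep : List Char) (c : Char) (t : List Char) (hc : c ≠ '\\') :
    scan1 ('\\' :: pq) rep (c :: t) = c :: scan1 ('\\' :: pq) rep t := by
  rw [scan1, if_neg]
  intro h
  have := List.isPrefixOf_iff_prefix.mp h
  rcases this with ⟨u, hu⟩
  simp at hu
  exact hc hu.1.symm

lemma scan1_append_clean (pq rep : List Char) (u : List Char) (hu : ∀ c ∈ u, c ≠ '\\') :
    ∀ x, scan1 ('\\' :: pq) rep (u ++ x) = u ++ scan1 ('\\' :: pq) rep x := by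
  induction u with
  | nil => intro x; simp
  | cons c u ih =>
    intro x
    rw [List.cons_append, scan1_cons_ne _ _ _ _ (hu c (by simp)), ih (fun d hd => hu d (by simp [hd]))]
    simp

lemma prefix_scan1_iff (pq rq : List Char) (t : List Char) :
    ∀ p : List Char, (∀ c ∈ p, c ≠ '\\' ∧ c ≠ '<') →
      (p <+: scan1 ('\\' :: pq) ('<' :: rq) t ↔ p <+: t) := by
  induction t using scan1.induct ('\\' :: pq) with
  | case1 => intro p hp; simp [scan1]
  | case2 c t h ih =>
    intro p hp
    rw [scan1, if_pos h]
    rcases List.isPrefixOf_iff_prefix.mp h with ⟨u, hu⟩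
    cases p with
    | nil => simp
    | cons a p' =>
      have ha := hp a (by simp)
      constructor
      · intro hpre
        rw [List.cons_append, List.cons_prefix_cons] at hpre
        exact absurd hpre.1 ha.2
      · intro hpre
        have hc : c = '\\' := by
          simp at hu
          exact hu.1.symm
        rw [hc, List.cons_prefix_cons] at hpre
        exact absurd hpre.1 ha.1
  | case3 c t h ih =>
    intro p hp
    rw [scan1, if_neg h]
    cases p with
    | nil => simp
    | cons a p' =>
      rw [List.cons_prefix_cons, List.cons_prefix_cons]
      constructor
      · rintro ⟨hac, hpre⟩
        exact ⟨hac, (ih p' (fun d hd => hp d (by simp [hd]))).mp hpre⟩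
      · rintro ⟨hac, hpre⟩
        exact ⟨hac, (ih p' (fun d hd => hp d (by simp [hd]))).mpr hpre⟩

lemma scan1_cons_ne' (pat rep : List Char) (hpat : pat.head? = some '\\') (c : Char)
    (t : List Char) (hc : c ≠ '\\') :
    scan1 pat rep (c :: t) = c :: scan1 pat rep t := by
  cases pat with
  | nil => simp at hpat
  | cons p pq =>
    obtain rfl : p = '\\' := by simpa using hpat
    exact scan1_cons_ne pq rep c t hc

lemma scan1_append_clean' (pat rep : List Char) (hpat : pat.head? = some '\\')
    (u : List Char) (hu : ∀ c ∈ u, c ≠ '\\') (x : List Char) :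
    scan1 pat rep (u ++ x) = u ++ scan1 pat rep x := by
  cases pat with
  | nil => simp at hpat
  | cons p pq =>
    obtain rfl : p = '\\' := by simpa using hpat
    exact scan1_append_clean pq rep u hu x

lemma prefix_scan1_iff' (pat rep : List Char) (hpat : pat.head? = some '\\')
    (hrep : rep.head? = some '<') (t p : List Char) (hp : ∀ c ∈ p, c ≠ '\\' ∧ c ≠ '<') :
    (p <+: scan1 pat rep t ↔ p <+: t) := by
  cases pat with
  | nil => simp at hpat
  | cons a pq =>
    obtain rfl : a = '\\' := by simpa using hpat
    cases rep with
    | nil => simp at hrep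
    | cons b rq =>
      obtain rfl : b = '<' := by simpa using hrep
      exact prefix_scan1_iff pq rq t p hp

-- the three concrete passes
lemma all_ne_backslash (u : String) (h : u.toList.all (· != '\\') = true) :
    ∀ c ∈ u.toList, c ≠ '\\' := by
  intro c hc
  simpa using List.all_eq_true.mp h c hc

set_option maxRecDepth 2048 in
lemma all_ne_two (u : String) (h : u.toList.all (fun c => c != '\\' && c != '<') = true) :
    ∀ c ∈ u.toList, c ≠ '\\' ∧ c ≠ '<' := by
  intro c hc
  have := List.all_eq_true.mp h c hc
  simp at this
  exact this

lemma scanIcons_eq (s : List Char) :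
    scanIcons s =
      scan1 "\\error".toList iconErrorHtml.toList
        (scan1 "\\done".toList iconDoneHtml.toList
          (scan1 "\\todo".toList iconTodoHtml.toList s)) := by
  have hTc : ∀ c ∈ iconTodoHtml.toList, c ≠ '\\' := all_ne_backslash _ rfl
  have hDc : ∀ c ∈ iconDoneHtml.toList, c ≠ '\\' := all_ne_backslash _ rfl
  have hTh : iconTodoHtml.toList.head? = some '<' := rfl
  have hDh : iconDoneHtml.toList.head? = some '<' := rfl
  induction s using scanIcons.induct with
  | case1 => rw [scanIcons]; simp [scan1]
  | case2 t h ih =>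
    have hA : scan1 "\\todo".toList iconTodoHtml.toList ('\\' :: t)
        = iconTodoHtml.toList ++ scan1 "\\todo".toList iconTodoHtml.toList (t.drop 4) := by
      rw [scan1, if_pos (by simpa using List.isPrefixOf_iff_prefix.mp h)]
      simp
    rw [scanIcons, if_pos rfl, if_pos h, hA, scan1_append_clean' _ _ rfl _ hTc,
      scan1_append_clean' _ _ rfl _ hTc, ih]
  | case3 t h1 h2 ih =>
    rcases List.isPrefixOf_iff_prefix.mp h2 with ⟨u, hu⟩
    subst hu
    have hA : scan1 "\\todo".toList iconTodoHtml.toList ('\\' :: ("done".toList ++ u))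
        = '\\' :: 'd' :: 'o' :: 'n' :: 'e' :: scan1 "\\todo".toList iconTodoHtml.toList u := by
      simp [scan1]
    have hB : scan1 "\\done".toList iconDoneHtml.toList
          ('\\' :: 'd' :: 'o' :: 'n' :: 'e' :: scan1 "\\todo".toList iconTodoHtml.toList u)
        = iconDoneHtml.toList ++ scan1 "\\done".toList iconDoneHtml.toList
            (scan1 "\\todo".toList iconTodoHtml.toList u) := by
      rw [scan1]
      simp
    have hdrop : List.drop 4 ("done".toList ++ u) = u := by simp
    rw [hdrop] at ih
    rw [scanIcons, if_pos rfl, if_neg h1, if_pos h2, hdrop, hA, hB,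
      scan1_append_clean' _ _ rfl _ hDc, ih]
  | case4 t h1 h2 h3 ih =>
    rcases List.isPrefixOf_iff_prefix.mp h3 with ⟨u, hu⟩
    subst hu
    have hA : scan1 "\\todo".toList iconTodoHtml.toList ('\\' :: ("error".toList ++ u))
        = '\\' :: 'e' :: 'r' :: 'r' :: 'o' :: 'r' :: scan1 "\\todo".toList iconTodoHtml.toList u := by
      simp [scan1]
    have hB : scan1 "\\done".toList iconDoneHtml.toList
          ('\\' :: 'e' :: 'r' :: 'r' :: 'o' :: 'r' :: scan1 "\\todo".toList iconTodoHtml.toList u)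
        = '\\' :: 'e' :: 'r' :: 'r' :: 'o' :: 'r' :: scan1 "\\done".toList iconDoneHtml.toList
            (scan1 "\\todo".toList iconTodoHtml.toList u) := by
      simp [scan1]
    have hC : scan1 "\\error".toList iconErrorHtml.toList
          ('\\' :: 'e' :: 'r' :: 'r' :: 'o' :: 'r' :: scan1 "\\done".toList iconDoneHtml.toList
            (scan1 "\\todo".toList iconTodoHtml.toList u))
        = iconErrorHtml.toList ++ scan1 "\\error".toList iconErrorHtml.toList
            (scan1 "\\done".toList iconDoneHtml.toList
              (scan1 "\\todo".toList iconTodoHtml.toList u)) := by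
      rw [scan1]
      simp
    have hdrop : List.drop 5 ("error".toList ++ u) = u := by simp
    rw [hdrop] at ih
    rw [scanIcons, if_pos rfl, if_neg h1, if_neg h2, if_pos h3, hdrop, hA, hB, hC, ih]
  | case5 t h1 h2 h3 ih =>
    have hA : scan1 "\\todo".toList iconTodoHtml.toList ('\\' :: t)
        = '\\' :: scan1 "\\todo".toList iconTodoHtml.toList t := by
      have hcond : ¬ (("\\todo".toList).isPrefixOf ('\\' :: t) = true) := by
        rw [List.isPrefixOf_iff_prefix]
        rintro ⟨v, hv⟩
        apply h1
        rw [List.isPrefixOf_iff_prefix]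
        exact ⟨v, by simpa using hv⟩
      rw [scan1, if_neg hcond]
    have hB : scan1 "\\done".toList iconDoneHtml.toList
          ('\\' :: scan1 "\\todo".toList iconTodoHtml.toList t)
        = '\\' :: scan1 "\\done".toList iconDoneHtml.toList
            (scan1 "\\todo".toList iconTodoHtml.toList t) := by
      have hcond : ¬ (("\\done".toList).isPrefixOf
          ('\\' :: scan1 "\\todo".toList iconTodoHtml.toList t) = true) := by
        rw [List.isPrefixOf_iff_prefix]
        rintro ⟨v, hv⟩
        have hpre : "done".toList <+: scan1 "\\todo".toList iconTodoHtml.toList t :=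
          ⟨v, by simpa using hv⟩
        rw [prefix_scan1_iff' "\\todo".toList iconTodoHtml.toList rfl hTh t "done".toList
          (all_ne_two _ rfl)] at hpre
        exact h2 (List.isPrefixOf_iff_prefix.mpr hpre)
      rw [scan1, if_neg hcond]
    have hC : scan1 "\\error".toList iconErrorHtml.toList
          ('\\' :: scan1 "\\done".toList iconDoneHtml.toList
            (scan1 "\\todo".toList iconTodoHtml.toList t))
        = '\\' :: scan1 "\\error".toList iconErrorHtml.toList
            (scan1 "\\done".toList iconDoneHtml.toList
              (scan1 "\\todo".toList iconTodoHtml.toList t)) := by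
      have hcond : ¬ (("\\error".toList).isPrefixOf
          ('\\' :: scan1 "\\done".toList iconDoneHtml.toList
            (scan1 "\\todo".toList iconTodoHtml.toList t)) = true) := by
        rw [List.isPrefixOf_iff_prefix]
        rintro ⟨v, hv⟩
        have hpre : "error".toList <+: scan1 "\\done".toList iconDoneHtml.toList
            (scan1 "\\todo".toList iconTodoHtml.toList t) := ⟨v, by simpa using hv⟩
        rw [prefix_scan1_iff' "\\done".toList iconDoneHtml.toList rfl hDh
            (scan1 "\\todo".toList iconTodoHtml.toList t) "error".toList (all_ne_two _ rfl),
          prefix_scan1_iff' "\\todo".toList iconTodoHtml.toList rfl hTh t "error".toList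
            (all_ne_two _ rfl)] at hpre
        exact h3 (List.isPrefixOf_iff_prefix.mpr hpre)
      rw [scan1, if_neg hcond]
    rw [scanIcons, if_pos rfl, if_neg h1, if_neg h2, if_neg h3, hA, hB, hC, ih]
  | case6 c t hc ih =>
    rw [scanIcons, if_neg hc, scan1_cons_ne' _ _ rfl _ _ hc, scan1_cons_ne' _ _ rfl _ _ hc,
      scan1_cons_ne' _ _ rfl _ _ hc, ih]

lemma step_eq (pat rep : String) (hpat : pat.toList ≠ []) (s : String) :
    (if PySem.Str.isIn pat s then PySem.Str.replace s pat rep else s).toList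
      = scan1 pat.toList rep.toList s.toList := by
  by_cases h : PySem.Str.isIn pat s
  · rw [if_pos h, PySem.Str.toList_replace, replace_eq_scan1 _ _ _ hpat]
  · rw [if_neg h]
    have : ¬ pat.toList <:+: s.toList := by
      rw [← PySem.Str.isIn_iff_infix]
      simpa using h
    exact (scan1_of_not_infix _ _ _ this).symm

-- ===== VERDICT (by name: the statement is the Claim_ definition above) =====
theorem render_icon_markups_spec : Claim_equal_render_icon_markups := by
  intro text _
  unfold Spec_render_icon_markups
  have key : (render_icon_markups text).toList = scanIcons text.toList := by
    simp only [render_icon_markups]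
    rw [step_eq "\\error" iconErrorHtml (by simp), step_eq "\\done" iconDoneHtml (by simp),
      step_eq "\\todo" iconTodoHtml (by simp), ← scanIcons_eq]
  unfold render_icon_markups_alt
  rw [← key, String.ofList_toList]
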